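-- pv_equiv track=rewrite | github.com/jiajunma/unipotentrepn | standalone.py | _simp_W_repn
-- ===== SOURCE A (Python) =====
-- def _simp_W_repn(tau):
--     """Simplify bipartition: strip trailing zeros, check decreasing."""
--     tauL, tauR = tau
--     tauL = [x for x in tauL if x > 0]
--     tauR = [x for x in tauR if x > 0]
--     # Check decreasing
--     for i in range(len(tauL) - 1):
--         if tauL[i] < tauL[i + 1]:
--             return None
--     for i in range(len(tauR) - 1):
--         if tauR[i] < tauR[i + 1]:
--             return None
--     return (tauL, tauR)
-- ===== SOURCE B (Python) =====
-- def _simp_W_repn(tau):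
--     """Simplify bipartition: strip zeros; each part must equal its own descending sort."""
--     tauL = [x for x in tau[0] if x > 0]
--     tauR = [x for x in tau[1] if x > 0]
--     if tauL != sorted(tauL, reverse=True) or tauR != sorted(tauR, reverse=True):
--         return None
--     return (tauL, tauR)
-- ===== Notes on version B (the rewrite author's own statement) =====
-- stated objective: idiomatic
-- what changed: Replaces the two explicit index loops over adjacent pairs with a sort-then-compare check: each filtered part must equal its own stable descending sort.
import Mathlib
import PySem

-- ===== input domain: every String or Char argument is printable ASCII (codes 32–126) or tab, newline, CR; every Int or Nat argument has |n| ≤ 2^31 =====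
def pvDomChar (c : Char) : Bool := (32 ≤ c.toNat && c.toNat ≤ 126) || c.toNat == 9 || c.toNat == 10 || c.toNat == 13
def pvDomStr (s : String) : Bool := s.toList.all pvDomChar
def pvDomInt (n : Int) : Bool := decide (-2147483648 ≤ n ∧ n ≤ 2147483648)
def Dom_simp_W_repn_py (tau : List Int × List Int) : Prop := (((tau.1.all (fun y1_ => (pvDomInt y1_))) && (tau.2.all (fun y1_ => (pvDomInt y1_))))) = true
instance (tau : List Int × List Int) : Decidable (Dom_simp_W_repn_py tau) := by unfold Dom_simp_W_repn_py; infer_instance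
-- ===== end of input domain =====

-- ===== PORT A =====
-- B replaces A's adjacent-pair index loops with a sort-then-compare check (idiomatic; same outputs).
-- transliteration of A's "for i in range(len(l)-1): if l[i] < l[i+1]: return None" loop
def pvCheckDec : List Int → Bool
  | a :: b :: t => if a < b then false else pvCheckDec (b :: t)
  | _ => true

def simp_W_repn_py (tau : List Int × List Int) : Option (List Int × List Int) :=
  let tauL := tau.1.filter (fun x => decide (0 < x))
  let tauR := tau.2.filter (fun x => decide (0 < x))
  if pvCheckDec tauL = false then none
  else if pvCheckDec tauR = false then none
  else some (tauL, tauR)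

-- ===== PORT B =====
def simp_W_repn_py_alt (tau : List Int × List Int) : Option (List Int × List Int) :=
  let tauL := tau.1.filter (fun x => decide (0 < x))
  let tauR := tau.2.filter (fun x => decide (0 < x))
  if tauL ≠ PySem.List.sorted tauL (fun x => x) true ∨
     tauR ≠ PySem.List.sorted tauR (fun x => x) true then none
  else some (tauL, tauR)

-- ===== PRECONDITION & SPEC =====
def Spec_simp_W_repn_py (tau : List Int × List Int) (out : Option (List Int × List Int)) : Prop := out = simp_W_repn_py_alt tau
instance (tau : List Int × List Int) (out : Option (List Int × List Int)) : Decidable (Spec_simp_W_repn_py tau out) := by unfold Spec_simp_W_repn_py; infer_instance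

-- ===== CLAIM (what is proved, stated in full; the proofs are below) =====
def Claim_equal_simp_W_repn_py : Prop := ∀ (tau : List Int × List Int), Dom_simp_W_repn_py tau → Spec_simp_W_repn_py tau (simp_W_repn_py tau)

-- ===== LEMMAS AND PROOFS =====
theorem pvCheckDec_iff_pairwise (l : List Int) :
    pvCheckDec l = true ↔ l.Pairwise (fun a b => b ≤ a) := by
  induction l with
  | nil => simp [pvCheckDec]
  | cons a t ih =>
    cases t with
    | nil => simp [pvCheckDec]
    | cons b t' =>
      simp only [pvCheckDec]
      constructor
      · intro h
        by_cases hab : a < b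
        · rw [if_pos hab] at h; exact absurd h (by simp)
        · rw [if_neg hab] at h
          have hp := ih.mp h
          have hbt : ∀ x ∈ t', x ≤ b := fun x hx => (List.pairwise_cons.mp hp).1 x hx
          refine List.pairwise_cons.mpr ⟨?_, hp⟩
          intro x hx
          rcases List.mem_cons.mp hx with h1 | h1
          · subst h1; omega
          · have := hbt x h1; omega
      · intro hp
        have hba : b ≤ a := (List.pairwise_cons.mp hp).1 b (by simp)
        rw [if_neg (by omega)]
        exact ih.mpr (List.pairwise_cons.mp hp).2

theorem pvCheckDec_iff_sorted (l : List Int) :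
    pvCheckDec l = true ↔ l = PySem.List.sorted l (fun x => x) true := by
  rw [pvCheckDec_iff_pairwise]
  constructor
  · intro h
    exact (PySem.List.sorted_rev_eq_self_of_pairwise l (fun x : Int => x) h).symm
  · intro h
    have := PySem.List.sorted_pairwise_rev (xs := l) (key := fun x : Int => x)
    rw [← h] at this
    exact this

-- ===== VERDICT (by name: the statement is the Claim_ definition above) =====
theorem simp_W_repn_py_spec : Claim_equal_simp_W_repn_py := by
  intro tau _
  unfold Spec_simp_W_repn_py simp_W_repn_py simp_W_repn_py_alt
  set L := tau.1.filter (fun x => decide (0 < x))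
  set R := tau.2.filter (fun x => decide (0 < x))
  have hL := pvCheckDec_iff_sorted L
  have hR := pvCheckDec_iff_sorted R
  by_cases h1 : pvCheckDec L = true <;> by_cases h2 : pvCheckDec R = true
  · rw [if_neg (by simp [h1]), if_neg (by simp [h2]),
        if_neg (by push Not; exact ⟨hL.mp h1, hR.mp h2⟩)]
  · rw [if_neg (by simp [h1]), if_pos (by simp [h2]),
        if_pos (Or.inr (fun hc => h2 (hR.mpr hc)))]
  · rw [if_pos (by simp at h1; exact h1),
        if_pos (Or.inl (fun hc => h1 (hL.mpr hc)))]
  · rw [if_pos (by simp at h1; exact h1),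
        if_pos (Or.inl (fun hc => h1 (hL.mpr hc)))]
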